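-- pv_equiv track=rewrite | github.com/roccocesetti/lasercom_2_13 | models/sale_order.py | decode_protocollo
-- ===== SOURCE A (Python) =====
-- def decode_protocollo(valore="0"):
--     nprot = {'1':'AAA',
--                    '2':'BCD',
--                    '3':'EFG',
--                    '4':'HIL',
--                    '5':'MNO',
--                    '6':'PQR',
--                    '7':'STU',
--                    '8':'VWZ',
--                    '9':'YJY',
--                    '0':'TTT',
--                    ',':'V',
--                    '.':'P'
--     }
--     myvalore="A"
--     valchar2=""
--     id3=3
--     for valchar in valore:
--         id3= id3+1 if id3<3 else 0
--         if id3==0 :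
--             valchar2= valchar
--         else:
--             valchar2= valchar2+valchar
--         if id3==3:
--             myvalore= myvalore+nprot[valchar]+valchar2
--     if id3<3:
--             myvalore= myvalore+nprot[valchar]+valchar2
--     myvalore=myvalore.replace('.','VI').replace('.','PU')
--
--     return myvalore
-- ===== SOURCE B (Python) =====
-- def decode_protocollo(valore="0"):
--     nprot = {'1': 'AAA', '2': 'BCD', '3': 'EFG', '4': 'HIL', '5': 'MNO',
--              '6': 'PQR', '7': 'STU', '8': 'VWZ', '9': 'YJY', '0': 'TTT',
--              ',': 'V', '.': 'P'}
--     out = "A"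
--     rest = valore
--     while rest:
--         chunk, rest = rest[:4], rest[4:]
--         out += nprot[chunk[-1]] + chunk
--     return out.replace('.', 'VI')
-- ===== Notes on version B (the rewrite author's own statement) =====
-- stated objective: simpler
-- what changed: Replaced the id3 mod-4 counter, the valchar2 accumulator and the post-loop fix-up with a while loop that slices 4-char chunks off the front of the string and appends nprot[chunk[-1]]+chunk per chunk, and dropped the dead second replace.
import Mathlib
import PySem

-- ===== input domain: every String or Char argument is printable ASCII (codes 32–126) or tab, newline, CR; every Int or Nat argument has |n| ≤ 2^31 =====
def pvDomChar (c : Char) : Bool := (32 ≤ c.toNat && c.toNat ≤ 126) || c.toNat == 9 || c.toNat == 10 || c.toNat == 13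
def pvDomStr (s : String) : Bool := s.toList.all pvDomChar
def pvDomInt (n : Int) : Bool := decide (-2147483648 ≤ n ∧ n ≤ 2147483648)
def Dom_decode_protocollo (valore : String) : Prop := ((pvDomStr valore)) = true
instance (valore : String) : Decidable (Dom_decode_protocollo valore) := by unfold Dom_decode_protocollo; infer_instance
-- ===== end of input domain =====

-- B replaces A's id3 mod-4 counter / valchar2 accumulator state machine with a while loop that
-- slices 4-char chunks off the front of the string (objective: simpler; same O(n) cost).

-- ===== PORT A =====
-- the nprot dict of A (shared literal table; values as List Char — strings are handled on the
-- List Char side throughout, with String.ofList at the end, as PySem prescribes)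
def nprotD : PySem.Dict Char (List Char) :=
  PySem.Dict.ofList
  [('1', ['A','A','A']), ('2', ['B','C','D']), ('3', ['E','F','G']), ('4', ['H','I','L']),
   ('5', ['M','N','O']), ('6', ['P','Q','R']), ('7', ['S','T','U']), ('8', ['V','W','Z']),
   ('9', ['Y','J','Y']), ('0', ['T','T','T']), (',', ['V']), ('.', ['P'])]

-- nprot[c]; the missing-key case (Python KeyError) is excluded by Pre_, the default [] is never
-- used on admitted inputs
def nprot (c : Char) : List Char := (PySem.Dict.get? nprotD c).getD []

-- one iteration of A's for-loop; state = (myvalore, valchar2, id3, valchar)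
def aStep (st : List Char × List Char × Int × Char) (c : Char) : List Char × List Char × Int × Char :=
  let id3 : Int := if st.2.2.1 < 3 then st.2.2.1 + 1 else 0
  let valchar2 := if id3 = 0 then [c] else st.2.1 ++ [c]
  let myvalore := if id3 = 3 then st.1 ++ nprot c ++ valchar2 else st.1
  (myvalore, valchar2, id3, c)

def decode_protocollo (valore : String) : String :=
  let st := valore.toList.foldl aStep (['A'], [], (3 : Int), ' ')
  let myvalore := if st.2.2.1 < 3 then st.1 ++ nprot st.2.2.2 ++ st.2.1 else st.1
  String.ofList (PySem.Chars.replace (PySem.Chars.replace myvalore ['.'] ['V','I']) ['.'] ['P','U'])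

-- ===== PORT B =====
-- the while loop of Source B: rest[:4] / rest[4:] are take 4 / drop 4 (nonnegative-bound slices);
-- chunk[-1] is the last element of the nonempty chunk (getLastD default unreachable)
def bChunks : List Char → List Char → List Char
  | [], out => out
  | c :: t, out =>
    bChunks ((c :: t).drop 4) (out ++ nprot (((c :: t).take 4).getLastD ' ') ++ (c :: t).take 4)
termination_by rest _ => rest.length
decreasing_by simp

def decode_protocollo_alt (valore : String) : String :=
  String.ofList (PySem.Chars.replace (bChunks valore.toList ['A']) ['.'] ['V','I'])

-- ===== PRECONDITION & SPEC =====
-- Pre_ excludes exactly the inputs on which A raises KeyError: the last character of some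
-- 4-character chunk (index ≡ 3 mod 4, or the final index) is not a key of nprot.
def Pre_decode_protocollo (valore : String) : Prop :=
  ∀ i : Nat, i < valore.toList.length → (i % 4 = 3 ∨ i + 1 = valore.toList.length) →
    valore.toList.getD i ' ' ∈ ['1','2','3','4','5','6','7','8','9','0',',','.']
instance (valore : String) : Decidable (Pre_decode_protocollo valore) := by
  unfold Pre_decode_protocollo; infer_instance

def pvWitness_decode_protocollo : String := "12,45."

def Spec_decode_protocollo (valore : String) (out : String) : Prop := out = decode_protocollo_alt valore
instance (valore : String) (out : String) : Decidable (Spec_decode_protocollo valore out) := by unfold Spec_decode_protocollo; infer_instance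

-- ===== CLAIM (what is proved, stated in full; the proofs are below) =====
def Claim_equal_decode_protocollo : Prop := ∀ (valore : String), Dom_decode_protocollo valore → Pre_decode_protocollo valore → Spec_decode_protocollo valore (decode_protocollo valore)

-- ===== LEMMAS AND PROOFS =====

-- unfolding equations for B's chunk loop
theorem bChunks_nil (out : List Char) : bChunks [] out = out := by
  rw [bChunks]

theorem bChunks_cons (c : Char) (t out : List Char) :
    bChunks (c :: t) out
      = bChunks ((c :: t).drop 4) (out ++ nprot (((c :: t).take 4).getLastD ' ') ++ (c :: t).take 4) := by
  rw [bChunks]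

-- A's loop plus its post-loop fix-up, from a chunk boundary (id3 = 3), equals B's chunk loop.
theorem loop_eq (n : Nat) : ∀ (l : List Char), l.length ≤ n → ∀ (myv v2 : List Char) (c0 : Char),
    (if (List.foldl aStep (myv, v2, (3 : Int), c0) l).2.2.1 < 3 then
       (List.foldl aStep (myv, v2, (3 : Int), c0) l).1
         ++ nprot (List.foldl aStep (myv, v2, (3 : Int), c0) l).2.2.2
         ++ (List.foldl aStep (myv, v2, (3 : Int), c0) l).2.1
     else (List.foldl aStep (myv, v2, (3 : Int), c0) l).1) = bChunks l myv := by
  induction n with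
  | zero =>
    intro l hl myv v2 c0
    have : l = [] := List.eq_nil_of_length_eq_zero (Nat.le_zero.mp hl)
    subst this
    simp [bChunks_nil]
  | succ n ih =>
    intro l hl myv v2 c0
    match l with
    | [] => simp [bChunks_nil]
    | [a] => rw [bChunks_cons]; simp [aStep, bChunks_nil]
    | [a, b] => rw [bChunks_cons]; simp [aStep, bChunks_nil]
    | [a, b, c] => rw [bChunks_cons]; simp [aStep, bChunks_nil]
    | a :: b :: c :: d :: rest =>
      have h4 : List.foldl aStep (myv, v2, (3 : Int), c0) (a :: b :: c :: d :: rest)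
          = List.foldl aStep (myv ++ nprot d ++ [a, b, c, d], [a, b, c, d], (3 : Int), d) rest := by
        simp [aStep]
      rw [h4]
      have hrest : rest.length ≤ n := by
        simp at hl; omega
      rw [ih rest hrest (myv ++ nprot d ++ [a, b, c, d]) [a, b, c, d] d]
      rw [bChunks_cons]
      simp

-- replace.go, with single-char pattern ['.'] absent from l, is the identity (fuel ≥ length)
theorem go_id (new : List Char) : ∀ (fuel : Nat) (l acc : List Char), l.length ≤ fuel →
    '.' ∉ l → PySem.Chars.replace.go ['.'] new fuel l acc = acc.reverse ++ l := by
  intro fuel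
  induction fuel with
  | zero =>
    intro l acc hl _
    have : l = [] := List.eq_nil_of_length_eq_zero (Nat.le_zero.mp hl)
    subst this
    simp [PySem.Chars.replace.go]
  | succ fuel ih =>
    intro l acc hl hni
    match l with
    | [] => simp [PySem.Chars.replace.go]
    | c :: t =>
      have hc : c ≠ '.' := fun h => hni (h ▸ List.mem_cons_self ..)
      have hpre : List.isPrefixOf ['.'] (c :: t) = false := by
        simp [List.isPrefixOf]; exact fun h => (hc h.symm).elim
      unfold PySem.Chars.replace.go
      rw [hpre]
      simp only [Bool.false_eq_true, if_false]
      have ht : t.length ≤ fuel := by simp at hl; omega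
      rw [ih t (c :: acc) ht (fun h => hni (List.mem_cons_of_mem _ h))]
      simp

-- replace.go with pattern ['.'] and dot-free replacement produces a dot-free result
theorem go_no_dot (new : List Char) (hnew : '.' ∉ new) : ∀ (fuel : Nat) (l acc : List Char),
    l.length ≤ fuel → '.' ∉ acc → '.' ∉ PySem.Chars.replace.go ['.'] new fuel l acc := by
  intro fuel
  induction fuel with
  | zero =>
    intro l acc hl hacc
    have : l = [] := List.eq_nil_of_length_eq_zero (Nat.le_zero.mp hl)
    subst this
    simpa [PySem.Chars.replace.go] using hacc
  | succ fuel ih =>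
    intro l acc hl hacc
    match l with
    | [] => simpa [PySem.Chars.replace.go] using hacc
    | c :: t =>
      unfold PySem.Chars.replace.go
      by_cases hpre : List.isPrefixOf ['.'] (c :: t) = true
      · rw [hpre]
        simp only [if_true]
        have hdrop : (List.drop 1 (c :: t)).length ≤ fuel := by simp at hl ⊢; omega
        refine ih _ _ hdrop ?_
        intro h
        rcases List.mem_append.mp h with h | h
        · exact hnew (List.mem_reverse.mp h)
        · exact hacc h
      · simp only [hpre]
        simp only [Bool.false_eq_true, if_false]
        have hc : c ≠ '.' := by
          intro h; subst h
          exact hpre (by simp [List.isPrefixOf])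
        have ht : t.length ≤ fuel := by simp at hl; omega
        refine ih _ _ ht ?_
        intro h
        rcases List.mem_cons.mp h with h | h
        · exact hc h.symm
        · exact hacc h

-- A's second replace is the identity: after replacing '.' by "VI" no '.' remains
theorem second_replace_id (l : List Char) :
    PySem.Chars.replace (PySem.Chars.replace l ['.'] ['V','I']) ['.'] ['P','U']
      = PySem.Chars.replace l ['.'] ['V','I'] := by
  have hnd : '.' ∉ PySem.Chars.replace l ['.'] ['V','I'] := by
    unfold PySem.Chars.replace
    simp only [List.isEmpty_cons, Bool.false_eq_true, if_false]
    exact go_no_dot ['V','I'] (by decide) l.length l [] le_rfl (by simp)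
  unfold PySem.Chars.replace
  simp only [List.isEmpty_cons, Bool.false_eq_true, if_false]
  exact go_id ['P','U'] _ _ [] le_rfl hnd

-- ===== VERDICT (by name: the statement is the Claim_ definition above) =====
theorem decode_protocollo_spec : Claim_equal_decode_protocollo := by
  intro valore _ _
  unfold Spec_decode_protocollo
  simp only [decode_protocollo, decode_protocollo_alt]
  rw [second_replace_id]
  rw [loop_eq valore.toList.length valore.toList le_rfl ['A'] [] ' ']
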